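-- pv_equiv track=rewrite | github.com/andela-angene/Algorithmic-Problem-Solving | Hackerrank/algorithms/search/01-hackerland-radio-transmitters.py | find_station
-- ===== SOURCE A (Python) =====
-- def find_station(index, k, ar):
--     distance, minimum = 0, ar[index]
--
--     while index < len(ar):
--         distance = ar[index] - minimum
--         if distance > k:
--             return index - 1
--         index += 1
--     return -1
-- ===== SOURCE B (Python) =====
-- def find_station(index, k, ar):
--     n = len(ar)
--     vals = [ar[i] for i in range(index, n)]
--     limit = vals[0] + k
--     pm = []
--     m = vals[0]
--     for v in vals:
--         m = v if v > m else m
--         pm.append(m)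
--     if pm[-1] <= limit:
--         return -1
--     lo, hi = 0, len(pm) - 1
--     while lo < hi:
--         mid = (lo + hi) // 2
--         if pm[mid] > limit:
--             hi = mid
--         else:
--             lo = mid + 1
--     return index + lo - 1
-- ===== Notes on version B (the rewrite author's own statement) =====
-- stated objective: alternative
-- what changed: B materialises the scanned values, builds their running prefix-maximum array (monotone by construction), and locates the first position whose prefix maximum exceeds ar[index]+k by binary search on that array, instead of A's linear scan with early return.
import Mathlib
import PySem

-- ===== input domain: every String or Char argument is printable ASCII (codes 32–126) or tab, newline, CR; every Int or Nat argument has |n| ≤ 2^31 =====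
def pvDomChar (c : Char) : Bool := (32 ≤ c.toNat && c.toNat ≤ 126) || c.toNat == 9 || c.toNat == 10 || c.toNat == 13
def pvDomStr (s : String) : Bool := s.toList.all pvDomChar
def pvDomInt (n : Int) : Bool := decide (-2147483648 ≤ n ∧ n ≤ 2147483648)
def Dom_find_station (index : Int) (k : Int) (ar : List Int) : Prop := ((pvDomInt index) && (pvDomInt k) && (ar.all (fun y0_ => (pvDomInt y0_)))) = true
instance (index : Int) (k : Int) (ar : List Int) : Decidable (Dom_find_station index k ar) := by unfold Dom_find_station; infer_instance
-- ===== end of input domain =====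

-- B replaces A's linear scan by a prefix-maximum array plus binary search on it (a different
-- algorithm, same results); equal wherever A's initial ar[index] does not raise.


-- ===== PORT A =====
-- A's while loop: scan from index while ar[index] - minimum ≤ k, early return index - 1.
def findLoopA (k : Int) (minimum : Int) (ar : List Int) (index : Int) : Int :=
  if _h : index < (ar.length : Int) then
    if PySem.List.pyGetD ar index 0 - minimum > k then index - 1
    else findLoopA k minimum ar (index + 1)
  else -1
termination_by ((ar.length : Int) - index).toNat
decreasing_by omega

def find_station (index : Int) (k : Int) (ar : List Int) : Int :=
  -- Python's ar[index] raises IndexError out of range: such inputs are outside Pre_.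
  let minimum := PySem.List.pyGetD ar index 0
  findLoopA k minimum ar index

-- ===== PORT B =====
-- Source B's while-loop binary search for the least position of pm exceeding limit (mid inlined).
def bsearchB (pm : List Int) (limit : Int) (lo hi : Int) : Int :=
  if _h : lo < hi then
    if PySem.List.pyGetD pm (PySem.Int.floordiv (lo + hi) 2) 0 > limit then
      bsearchB pm limit lo (PySem.Int.floordiv (lo + hi) 2)
    else
      bsearchB pm limit (PySem.Int.floordiv (lo + hi) 2 + 1) hi
  else lo
termination_by (hi - lo).toNat
decreasing_by
  · have h1 := (PySem.Int.floordiv_two_mid_bounds (le_of_lt _h)).1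
    have h2 : PySem.Int.floordiv (lo + hi) 2 < hi := by
      rw [PySem.Int.floordiv_lt_iff_lt_mul (by omega : (0:Int) < 2)]; omega
    omega
  · have h1 := (PySem.Int.floordiv_two_mid_bounds (le_of_lt _h)).1
    omega

def find_station_alt (index : Int) (k : Int) (ar : List Int) : Int :=
  let vals := (PySem.List.pyRange index (ar.length : Int) 1).map
    (fun i => PySem.List.pyGetD ar i 0)
  let limit := PySem.List.pyGetD vals 0 0 + k
  let pm := (vals.foldl
      (fun (st : List Int × Int) v =>
        ((st.1 ++ [if v > st.2 then v else st.2]), if v > st.2 then v else st.2))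
      (([] : List Int), PySem.List.pyGetD vals 0 0)).1
  if PySem.List.pyGetD pm (-1) 0 ≤ limit then -1
  else index + bsearchB pm limit 0 ((pm.length : Int) - 1) - 1

-- ===== PRECONDITION & SPEC =====
-- Pre_ excludes exactly the inputs where A's initial ar[index] raises IndexError.
def Pre_find_station (index : Int) (k : Int) (ar : List Int) : Prop :=
  PySem.Raise.InRange ar.length index
instance (index : Int) (k : Int) (ar : List Int) : Decidable (Pre_find_station index k ar) := by
  unfold Pre_find_station; infer_instance

def pvWitness_find_station : Int × Int × List Int := (1, 2, [1, 2, 5, 9])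

def Spec_find_station (index : Int) (k : Int) (ar : List Int) (out : Int) : Prop := out = find_station_alt index k ar
instance (index : Int) (k : Int) (ar : List Int) (out : Int) : Decidable (Spec_find_station index k ar out) := by unfold Spec_find_station; infer_instance

-- ===== CLAIM (what is proved, stated in full; the proofs are below) =====
def Claim_equal_find_station : Prop := ∀ (index : Int) (k : Int) (ar : List Int), Dom_find_station index k ar → Pre_find_station index k ar → Spec_find_station index k ar (find_station index k ar)

-- ===== LEMMAS AND PROOFS =====

-- Clean recursion computing the running prefix maxima that Source B's loop builds.
def runmaxSpec (m : Int) : List Int → List Int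
  | [] => []
  | v :: vs => (if v > m then v else m) :: runmaxSpec (if v > m then v else m) vs

theorem foldl_pm (l : List Int) : ∀ (m : Int) (acc : List Int),
    (l.foldl
      (fun (st : List Int × Int) v =>
        ((st.1 ++ [if v > st.2 then v else st.2]), if v > st.2 then v else st.2))
      (acc, m)).1 = acc ++ runmaxSpec m l := by
  induction l with
  | nil => intro m acc; simp [runmaxSpec]
  | cons v vs ih =>
    intro m acc
    simp only [List.foldl_cons, runmaxSpec]
    rw [ih]
    simp

theorem runmax_length (m : Int) (l : List Int) : (runmaxSpec m l).length = l.length := by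
  induction l generalizing m with
  | nil => rfl
  | cons v vs ih => simp [runmaxSpec, ih]

-- pm[j] exceeds limit iff some value up to position j does (findIdx form).
theorem runmax_gt_iff (limit : Int) (l : List Int) : ∀ (m : Int) (j : Nat), j < l.length →
    (limit < (runmaxSpec m l).getD j 0 ↔
      (limit < m ∨ l.findIdx (fun v => decide (limit < v)) ≤ j)) := by
  induction l with
  | nil => intro m j hj; simp at hj
  | cons v vs ih =>
    intro m j hj
    cases j with
    | zero =>
      rw [runmaxSpec, List.getD_cons_zero, List.findIdx_cons]
      by_cases hv : limit < v
      · simp only [hv, decide_true, cond_true]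
        constructor
        · intro _; right; omega
        · intro _; split <;> omega
      · simp only [hv, decide_false, cond_false]
        constructor
        · intro h
          split at h
          · exact absurd h hv
          · exact Or.inl h
        · rintro (h | h)
          · split <;> omega
          · omega
    | succ j =>
      rw [runmaxSpec, List.getD_cons_succ,
        ih (if v > m then v else m) j (by simpa using Nat.lt_of_succ_lt_succ hj),
        List.findIdx_cons]
      by_cases hv : limit < v
      · simp only [hv, decide_true, cond_true]
        constructor
        · intro _; right; omega
        · intro _
          left; split <;> omega
      · simp only [hv, decide_false, cond_false]
        constructor
        · rintro (h | h)
          · split at h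
            · exact absurd h hv
            · exact Or.inl h
          · right; omega
        · rintro (h | h)
          · left; split <;> omega
          · right; omega

-- Binary search over a list whose "exceeds limit" set of positions is exactly [F, ∞).
theorem bsearch_eq (pm : List Int) (limit : Int) (F : Int)
    (H : ∀ j : Nat, j < pm.length → (limit < pm.getD j 0 ↔ F ≤ (j : Int))) :
    ∀ lo hi : Int, 0 ≤ lo → lo ≤ F → F ≤ hi → hi < (pm.length : Int) →
      bsearchB pm limit lo hi = F := by
  intro lo hi
  induction lo, hi using bsearchB.induct pm limit with
  | case1 lo hi h hgt ih =>
    intro h0 hlF hFh hhl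
    have hb := PySem.Int.floordiv_two_mid_bounds (le_of_lt h)
    have hmid2 : PySem.Int.floordiv (lo + hi) 2 < hi := by
      rw [PySem.Int.floordiv_lt_iff_lt_mul (by omega : (0:Int) < 2)]; omega
    have hmidlen : (PySem.Int.floordiv (lo + hi) 2).toNat < pm.length := by omega
    have hgt2 := hgt
    rw [PySem.List.pyGetD_eq_getElem pm 0 (by omega) (by exact_mod_cast by omega)] at hgt2
    have hgt' : limit < pm.getD (PySem.Int.floordiv (lo + hi) 2).toNat 0 := by
      rw [List.getD_eq_getElem pm 0 hmidlen]; omega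
    have hFm : F ≤ PySem.Int.floordiv (lo + hi) 2 := by
      have := (H _ hmidlen).mp hgt'
      omega
    rw [bsearchB, dif_pos h, if_pos hgt]
    exact ih h0 hlF hFm (by omega)
  | case2 lo hi h hle ih =>
    intro h0 hlF hFh hhl
    have hb := PySem.Int.floordiv_two_mid_bounds (le_of_lt h)
    have hmid2 : PySem.Int.floordiv (lo + hi) 2 < hi := by
      rw [PySem.Int.floordiv_lt_iff_lt_mul (by omega : (0:Int) < 2)]; omega
    have hmidlen : (PySem.Int.floordiv (lo + hi) 2).toNat < pm.length := by omega
    have hle2 := hle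
    rw [PySem.List.pyGetD_eq_getElem pm 0 (by omega) (by exact_mod_cast by omega)] at hle2
    have hle' : ¬ limit < pm.getD (PySem.Int.floordiv (lo + hi) 2).toNat 0 := by
      rw [List.getD_eq_getElem pm 0 hmidlen]; omega
    have hFm : PySem.Int.floordiv (lo + hi) 2 + 1 ≤ F := by
      by_contra hc
      exact hle' ((H _ hmidlen).mpr (by omega))
    rw [bsearchB, dif_pos h, if_neg hle]
    exact ih (by omega) hFm hFh hhl
  | case3 lo hi h =>
    intro h0 hlF hFh hhl
    rw [bsearchB, dif_neg h]
    omega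

-- A's scan equals: first index j (in the mapped value list) exceeding minimum + k, minus 1.
theorem loopA_findIdx (k minimum : Int) (ar : List Int) : ∀ i : Int,
    findLoopA k minimum ar i =
      (let vs := (PySem.List.pyRange i (ar.length : Int) 1).map
          (fun t => PySem.List.pyGetD ar t 0)
       let j := vs.findIdx (fun v => decide (minimum + k < v))
       if (j : Int) < (vs.length : Int) then i + (j : Int) - 1 else -1) := by
  intro i
  induction i using findLoopA.induct k minimum ar with
  | case1 i h hgt =>
    rw [findLoopA, dif_pos h, if_pos hgt, PySem.List.pyRange_one_cons h]
    simp only [List.map_cons, List.findIdx_cons]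
    have hx : (minimum + k < PySem.List.pyGetD ar i 0) := by omega
    simp [hx]
  | case2 i h hle ih =>
    rw [findLoopA, dif_pos h, if_neg hle, PySem.List.pyRange_one_cons h, ih]
    simp only [List.map_cons, List.findIdx_cons]
    have hx : ¬ (minimum + k < PySem.List.pyGetD ar i 0) := by omega
    simp only [hx, decide_false, cond_false, List.length_cons]
    split <;> split <;> push_cast <;> omega
  | case3 i h =>
    rw [findLoopA, dif_neg h, PySem.List.pyRange_one_eq_nil (by omega)]
    simp

-- ===== VERDICT (by name: the statement is the Claim_ definition above) =====
theorem find_station_spec : Claim_equal_find_station := by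
  intro index k ar _hdom hpre
  obtain ⟨hlo, hhi⟩ := hpre
  unfold Spec_find_station find_station find_station_alt
  simp only []
  -- abbreviations
  set vals := (PySem.List.pyRange index (ar.length : Int) 1).map
    (fun i => PySem.List.pyGetD ar i 0) with hvals
  have hcons : vals = PySem.List.pyGetD ar index 0 ::
      (PySem.List.pyRange (index + 1) (ar.length : Int) 1).map
        (fun i => PySem.List.pyGetD ar i 0) := by
    rw [hvals, PySem.List.pyRange_one_cons hhi, List.map_cons]
  have hhead : PySem.List.pyGetD vals 0 0 = PySem.List.pyGetD ar index 0 := by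
    rw [hcons, PySem.List.pyGetD_zero, List.getD_cons_zero]
  rw [hhead]
  set minimum := PySem.List.pyGetD ar index 0 with hmin
  set pm := (vals.foldl
      (fun (st : List Int × Int) v =>
        ((st.1 ++ [if v > st.2 then v else st.2]), if v > st.2 then v else st.2))
      (([] : List Int), minimum)).1 with hpmdef
  have hpm : pm = runmaxSpec minimum vals := by
    rw [hpmdef, foldl_pm]; simp
  set F : Nat := vals.findIdx (fun v => decide (minimum + k < v)) with hFdef
  have hvlen : 0 < vals.length := by rw [hcons]; simp
  have hpmlen : pm.length = vals.length := by rw [hpm, runmax_length]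
  have hF0 : minimum + k < minimum → F = 0 := by
    intro h
    rw [hFdef, hcons, List.findIdx_cons]
    simp [h]
  have H : ∀ j : Nat, j < pm.length → (minimum + k < pm.getD j 0 ↔ (F : Int) ≤ (j : Int)) := by
    intro j hj
    rw [hpm]
    rw [runmax_gt_iff (minimum + k) vals minimum j (by omega)]
    constructor
    · rintro (h | h)
      · have := hF0 h; omega
      · omega
    · intro h
      right; omega
  have hA := loopA_findIdx k minimum ar index
  simp only [] at hA
  rw [← hvals, ← hFdef] at hA
  have hne : pm ≠ [] := by
    intro hc
    rw [hc] at hpmlen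
    simp at hpmlen
    omega
  have hlast : PySem.List.pyGetD pm (-1) 0 = pm.getD (pm.length - 1) 0 := by
    rw [PySem.List.pyGetD_neg_one pm 0 hne, List.getLast_eq_getElem,
      List.getD_eq_getElem pm 0 (by omega)]
  by_cases hc : PySem.List.pyGetD pm (-1) 0 ≤ minimum + k
  · -- no value exceeds the limit: both return -1
    rw [if_pos hc, hA]
    have hFbig : ¬ ((F : Int) ≤ ((pm.length - 1 : Nat) : Int)) := by
      intro hFle
      have := (H (pm.length - 1) (by omega)).mpr hFle
      rw [hlast] at hc
      omega
    have : ¬ ((F : Int) < (vals.length : Int)) := by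
      intro hlt
      exact hFbig (by omega)
    rw [if_neg this]
  · -- some value exceeds: binary search finds exactly F
    rw [if_neg hc, hA]
    have hFle : (F : Int) ≤ ((pm.length - 1 : Nat) : Int) := by
      by_contra hb
      rw [hlast] at hc
      exact hc (le_of_not_gt (fun hgt => hb ((H (pm.length - 1) (by omega)).mp hgt)))
    have hFlt : (F : Int) < (vals.length : Int) := by omega
    rw [if_pos hFlt]
    rw [bsearch_eq pm (minimum + k) (F : Int) H 0 ((pm.length : Int) - 1)
      (by omega) (by omega) (by omega) (by omega)]
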